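-- pv_equiv track=rewrite | github.com/PeterLuschny/tabl | tabl.py | SeqToFixlenString
-- ===== SOURCE A (Python) =====
-- def SeqToFixlenString(seq: list[int], maxlen: int = 90, separator=",") -> str:
--     stri = "["
--     maxl = 3
--     for trm in seq:
--         s = str(trm) + separator
--         maxl += len(s)
--         if maxl > maxlen:
--             break
--         stri += s
--     return stri + "]"
-- ===== SOURCE B (Python) =====
-- def SeqToFixlenString(seq: list[int], maxlen: int = 90, separator=",") -> str:
--     # pass 1: just count how many leading terms fit the budget (seed 3, strict >)
--     k = 0
--     total = 3
--     for trm in seq: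
--         total += len(str(trm)) + len(separator)
--         if total > maxlen:
--             break
--         k += 1
--     # pass 2: render exactly that prefix and join it between brackets
--     return "[" + "".join(str(trm) + separator for trm in seq[:k]) + "]"
-- ===== Notes on version B (the rewrite author's own statement) =====
-- stated objective: alternative
-- what changed: Replaces A's single loop that incrementally concatenates the result string (breaking mid-build) with a two-phase decomposition: a counting pass over term lengths finds the cutoff k, then the answer is produced by slicing the first k terms and joining their renderings between brackets.
import Mathlib
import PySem

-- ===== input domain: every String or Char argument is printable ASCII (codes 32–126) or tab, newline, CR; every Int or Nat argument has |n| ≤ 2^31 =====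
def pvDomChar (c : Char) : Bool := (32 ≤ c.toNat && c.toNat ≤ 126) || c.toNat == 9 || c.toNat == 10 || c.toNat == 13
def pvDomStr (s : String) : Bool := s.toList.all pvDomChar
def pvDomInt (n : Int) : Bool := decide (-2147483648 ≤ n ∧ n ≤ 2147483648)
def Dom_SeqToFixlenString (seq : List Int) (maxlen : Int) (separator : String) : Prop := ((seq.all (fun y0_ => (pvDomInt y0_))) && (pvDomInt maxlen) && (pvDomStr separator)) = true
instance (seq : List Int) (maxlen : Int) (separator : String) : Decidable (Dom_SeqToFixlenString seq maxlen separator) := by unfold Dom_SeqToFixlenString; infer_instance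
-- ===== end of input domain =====

-- B computes the cutoff k in a lengths-only counting pass, then renders and joins the first k terms between brackets, instead of A's incremental concatenation loop with a mid-build break; alternative decomposition, same cost.


-- ===== PORT A =====
-- A's for-loop with early break, over the same state (stri, maxl); strings handled on the List Char side (PySem convention)
def pvA_loop (seq : List Int) (maxlen : Int) (sep : List Char) (stri : List Char) (maxl : Int) : List Char :=
  match seq with
  | [] => stri ++ [']']
  | trm :: rest =>
    let s := PySem.Int.toChars trm ++ sep
    let maxl' := maxl + (s.length : Int)
    if maxl' > maxlen then stri ++ [']']
    else pvA_loop rest maxlen sep (stri ++ s) maxl'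

def SeqToFixlenString (seq : List Int) (maxlen : Int) (separator : String) : String :=
  String.ofList (pvA_loop seq maxlen separator.toList ['['] 3)

-- ===== PORT B =====
-- Source B pass 1: count the leading terms whose running total (seeded 3) stays ≤ maxlen
def pvCount (seq : List Int) (sepLen : Int) (maxlen : Int) (total : Int) : Nat :=
  match seq with
  | [] => 0
  | trm :: rest =>
    let total' := total + ((PySem.Int.toChars trm).length : Int) + sepLen
    if total' > maxlen then 0 else 1 + pvCount rest sepLen maxlen total'

def SeqToFixlenString_alt (seq : List Int) (maxlen : Int) (separator : String) : String :=
  let sep := separator.toList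
  let k := pvCount seq (sep.length : Int) maxlen 3
  -- Source B pass 2: "[" + "".join(str(trm) + separator for trm in seq[:k]) + "]"
  String.ofList (['['] ++ ((seq.take k).map (fun trm => PySem.Int.toChars trm ++ sep)).flatten ++ [']'])

-- ===== PRECONDITION & SPEC =====
def Spec_SeqToFixlenString (seq : List Int) (maxlen : Int) (separator : String) (out : String) : Prop := out = SeqToFixlenString_alt seq maxlen separator
instance (seq : List Int) (maxlen : Int) (separator : String) (out : String) : Decidable (Spec_SeqToFixlenString seq maxlen separator out) := by unfold Spec_SeqToFixlenString; infer_instance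

-- ===== CLAIM (what is proved, stated in full; the proofs are below) =====
def Claim_equal_SeqToFixlenString : Prop := ∀ (seq : List Int) (maxlen : Int) (separator : String), Dom_SeqToFixlenString seq maxlen separator → Spec_SeqToFixlenString seq maxlen separator (SeqToFixlenString seq maxlen separator)

-- ===== LEMMAS AND PROOFS =====

-- loop invariant: A's loop from any accumulator is that accumulator followed by B's
-- rendering of the counted prefix of the remaining terms, then the closing bracket
theorem pvA_loop_eq (maxlen : Int) (sep : List Char) :
    ∀ (seq : List Int) (stri : List Char) (maxl : Int),
    pvA_loop seq maxlen sep stri maxl =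
      stri ++ ((seq.take (pvCount seq (sep.length : Int) maxlen maxl)).map
        (fun trm => PySem.Int.toChars trm ++ sep)).flatten ++ [']'] := by
  intro seq
  induction seq with
  | nil => intro stri maxl; simp [pvA_loop, pvCount]
  | cons trm rest ih =>
    intro stri maxl
    simp only [pvA_loop, pvCount]
    by_cases h : maxl + ((PySem.Int.toChars trm ++ sep).length : Int) > maxlen
    · rw [if_pos h]
      have h2 : maxl + ((PySem.Int.toChars trm).length : Int) + (sep.length : Int) > maxlen := by
        push_cast [List.length_append] at h; omega
      simp [h2]
    · rw [if_neg h]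
      rw [ih (stri ++ (PySem.Int.toChars trm ++ sep))]
      have h2 : ¬ maxl + (((PySem.Int.toChars trm).length : Int)) + ((sep.length : Int)) > maxlen := by
        push_cast [List.length_append] at h; omega
      rw [if_neg h2, Nat.one_add, List.take_succ_cons]
      simp [List.length_append, List.append_assoc, add_assoc]

-- ===== VERDICT (by name: the statement is the Claim_ definition above) =====
theorem SeqToFixlenString_spec : Claim_equal_SeqToFixlenString := by
  intro seq maxlen separator _
  unfold Spec_SeqToFixlenString SeqToFixlenString SeqToFixlenString_alt
  rw [pvA_loop_eq]
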